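-- pv_equiv track=rewrite | github.com/NoblePaul-OJ/governor-ai | app/blueprints/chat/routes.py | _history_messages
-- ===== SOURCE A (Python) =====
-- def _history_messages(conversation_state, limit=5):
--     history = conversation_state.get("history", [])
--     normalized = []
--     for item in history:
--         if isinstance(item, dict):
--             role = str(item.get("role") or "user").strip().lower()
--             content = str(item.get("content") or "").strip()
--         else:
--             role = "user"
--             content = str(item).strip()
--
--         if not content:
--             continue
--         if role not in {"user", "assistant"}:
--             role = "user"
--         normalized.append({"role": role, "content": content})
--
--     if len(normalized) > limit:
--         normalized = normalized[-limit:]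
--     return normalized
-- ===== SOURCE B (Python) =====
-- def _history_messages(conversation_state, limit=5):
--     def _norm(item):
--         if isinstance(item, dict):
--             role = str(item.get("role") or "user").strip().lower()
--             content = str(item.get("content") or "").strip()
--         else:
--             role = "user"
--             content = str(item).strip()
--         if not content:
--             return None
--         if role not in {"user", "assistant"}:
--             role = "user"
--         return {"role": role, "content": content}
--
--     out = []
--     for item in reversed(conversation_state.get("history", [])):
--         if len(out) == limit:
--             break
--         msg = _norm(item)
--         if msg is not None:
--             out.append(msg)
--     out.reverse()
--     return out
-- ===== Notes on version B (the rewrite author's own statement) =====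
-- stated objective: alternative
-- what changed: B walks the history backwards with a factored-out per-item normalizer, stops as soon as `limit` valid messages are collected, and reverses the bounded result, instead of A's normalize-everything-then-slice; negative limits are outside the natural domain and excluded by Pre_.
-- intended difference: When limit == 0 and the history contains at least one non-empty message, A's `normalized[-limit:]` is `normalized[0:]` (the -0 slicing bug) so A returns the whole normalized history, while B returns the empty list, the intended 'last 0 messages'. — e.g. on _history_messages([("history", [[("content", "hi")]])], 0): A returns [[("role", "user"), ("content", "hi")]], B returns []
import Mathlib
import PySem

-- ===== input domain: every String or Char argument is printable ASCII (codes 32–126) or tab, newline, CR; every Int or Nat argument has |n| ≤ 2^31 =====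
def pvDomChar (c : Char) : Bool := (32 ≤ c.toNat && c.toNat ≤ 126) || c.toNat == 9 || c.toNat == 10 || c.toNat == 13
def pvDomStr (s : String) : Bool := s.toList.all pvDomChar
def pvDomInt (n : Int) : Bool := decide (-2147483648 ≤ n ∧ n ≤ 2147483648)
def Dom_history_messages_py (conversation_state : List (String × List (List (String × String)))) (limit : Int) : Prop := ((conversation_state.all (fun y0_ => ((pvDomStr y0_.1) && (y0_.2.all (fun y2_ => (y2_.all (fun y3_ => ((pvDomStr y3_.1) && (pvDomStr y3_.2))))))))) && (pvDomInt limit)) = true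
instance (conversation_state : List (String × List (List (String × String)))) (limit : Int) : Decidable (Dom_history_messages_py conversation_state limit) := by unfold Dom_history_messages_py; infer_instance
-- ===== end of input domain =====

-- B iterates the history BACKWARDS with a factored-out per-item normalizer and stops once `limit`
-- valid messages are collected (then reverses), instead of A's normalize-all-then-slice; same values
-- on limit ≥ 1, and B returns [] (the intended value) where A's `[-0:]` slice returns everything.

-- ===== PORT A =====
-- str(o or dflt) for o : Optional[str]: None and "" are falsy
def hmOr (o : Option String) (dflt : String) : String :=
  match o with
  | none => dflt
  | some s => if s = "" then dflt else s

def history_messages_py (conversation_state : List (String × List (List (String × String)))) (limit : Int) : List (List (String × String)) :=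
  let history := PySem.Dict.getD (PySem.Dict.mk conversation_state) "history" []
  let normalized := history.foldl (fun acc item =>
    let role := PySem.Str.lower (PySem.Str.strip (hmOr (PySem.Dict.get? (PySem.Dict.mk item) "role") "user"))
    let content := PySem.Str.strip (hmOr (PySem.Dict.get? (PySem.Dict.mk item) "content") "")
    if content = "" then acc
    else
      let role := if role == "user" || role == "assistant" then role else "user"
      acc ++ [[("role", role), ("content", content)]]) []
  if (normalized.length : Int) > limit then PySem.List.slice normalized (some (-limit)) none else normalized

-- ===== PORT B =====
-- B's helper `_norm`: returns the normalized message, or none for empty content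
def hmNorm (item : List (String × String)) : Option (List (String × String)) :=
  let role := PySem.Str.lower (PySem.Str.strip (hmOr (PySem.Dict.get? (PySem.Dict.mk item) "role") "user"))
  let content := PySem.Str.strip (hmOr (PySem.Dict.get? (PySem.Dict.mk item) "content") "")
  if content = "" then none
  else some [("role", if role == "user" || role == "assistant" then role else "user"), ("content", content)]

-- B's loop over the reversed history, breaking once `limit` messages are collected
def hmLoop (limit : Int) : List (List (String × String)) → List (List (String × String)) → List (List (String × String))
  | [], out => out
  | item :: rest, out =>
    if (out.length : Int) == limit then out
    else
      match hmNorm item with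
      | none => hmLoop limit rest out
      | some m => hmLoop limit rest (out ++ [m])

def history_messages_py_alt (conversation_state : List (String × List (List (String × String)))) (limit : Int) : List (List (String × String)) :=
  (hmLoop limit (PySem.Dict.getD (PySem.Dict.mk conversation_state) "history" []).reverse []).reverse

-- ===== PRECONDITION & SPEC =====
-- Pre_ restricts to the natural domain of a "keep the last N messages" limit: negative limits are a
-- malformed count (A there returns a positional slice `normalized[-limit:]`, B returns everything).
def Pre_history_messages_py (conversation_state : List (String × List (List (String × String)))) (limit : Int) : Prop := 0 ≤ limit
instance (conversation_state : List (String × List (List (String × String)))) (limit : Int) : Decidable (Pre_history_messages_py conversation_state limit) := by unfold Pre_history_messages_py; infer_instance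

def pvWitness_history_messages_py : (List (String × List (List (String × String)))) × Int :=
  ([("history", [[("role", "assistant"), ("content", " hi ")], [("content", "")]])], 1)

-- When limit == 0 and the history holds at least one message with a non-whitespace character in its
-- content, A's `normalized[-limit:]` is `normalized[0:]` (the -0 slicing bug) so A returns the whole
-- normalized history, while B returns [], the intended "last 0 messages".
def D_history_messages_py (conversation_state : List (String × List (List (String × String)))) (limit : Int) : Prop :=
  limit = 0 ∧
    (((conversation_state.find? (fun p => p.1 == "history")).map (·.2)).getD []).any
      (fun item => (((item.find? (fun p => p.1 == "content")).map (·.2)).getD "").toList.any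
        (fun c => !PySem.Chars.isspace c)) = true
instance (conversation_state : List (String × List (List (String × String)))) (limit : Int) : Decidable (D_history_messages_py conversation_state limit) := by unfold D_history_messages_py; infer_instance

def Spec_history_messages_py (conversation_state : List (String × List (List (String × String)))) (limit : Int) (out : List (List (String × String))) : Prop := ¬ D_history_messages_py conversation_state limit → out = history_messages_py_alt conversation_state limit
instance (conversation_state : List (String × List (List (String × String)))) (limit : Int) (out : List (List (String × String))) : Decidable (Spec_history_messages_py conversation_state limit out) := by unfold Spec_history_messages_py; infer_instance

def pvDiffWitness_history_messages_py : (List (String × List (List (String × String)))) × Int :=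
  ([("history", [[("content", "hi")]])], 0)
def pvDiffWitnessOut_history_messages_py : (List (List (String × String))) × (List (List (String × String))) :=
  ([[("role", "user"), ("content", "hi")]], [])

-- ===== CLAIM (what is proved, stated in full; the proofs are below) =====
def Claim_unchanged_history_messages_py : Prop := ∀ (conversation_state : List (String × List (List (String × String)))) (limit : Int), Dom_history_messages_py conversation_state limit → Pre_history_messages_py conversation_state limit → Spec_history_messages_py conversation_state limit (history_messages_py conversation_state limit)
def Claim_changed_history_messages_py : Prop := Dom_history_messages_py (pvDiffWitness_history_messages_py.1) (pvDiffWitness_history_messages_py.2) ∧ Pre_history_messages_py (pvDiffWitness_history_messages_py.1) (pvDiffWitness_history_messages_py.2) ∧ D_history_messages_py (pvDiffWitness_history_messages_py.1) (pvDiffWitness_history_messages_py.2) ∧ history_messages_py (pvDiffWitness_history_messages_py.1) (pvDiffWitness_history_messages_py.2) = pvDiffWitnessOut_history_messages_py.1 ∧ history_messages_py_alt (pvDiffWitness_history_messages_py.1) (pvDiffWitness_history_messages_py.2) = pvDiffWitnessOut_history_messages_py.2 ∧ pvDiffWitnessOut_history_messages_py.1 ≠ pvDiffWitnessOut_history_m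essages_py.2
def Claim_exact_history_messages_py : Prop := ∀ (conversation_state : List (String × List (List (String × String)))) (limit : Int), Dom_history_messages_py conversation_state limit → Pre_history_messages_py conversation_state limit → D_history_messages_py conversation_state limit → history_messages_py conversation_state limit ≠ history_messages_py_alt conversation_state limit

-- ===== LEMMAS AND PROOFS =====

-- a foldl that appends according to an Option-valued step is a filterMap
theorem foldl_append_filterMap {a b : Type} (f : List b -> a -> List b) (g : a -> Option b)
    (hfg : forall acc x, f acc x = acc ++ (g x).toList) :
    forall (h : List a) (acc : List b), h.foldl f acc = acc ++ h.filterMap g := by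
  intro h
  induction h with
  | nil => simp
  | cons x t ih =>
    intro acc
    rw [List.foldl_cons, hfg, List.filterMap_cons]
    cases hg : g x <;> simp [ih]

-- A's loop body (with its lets inlined) takes one step of hmNorm
theorem hmA_step : forall (acc : List (List (String × String))) (item : List (String × String)),
    (if PySem.Str.strip (hmOr (PySem.Dict.get? (PySem.Dict.mk item) "content") "") = "" then acc
      else
        acc ++
          [[("role",
                if (PySem.Str.lower (PySem.Str.strip (hmOr (PySem.Dict.get? (PySem.Dict.mk item) "role") "user")) == "user" ||
                    PySem.Str.lower (PySem.Str.strip (hmOr (PySem.Dict.get? (PySem.Dict.mk item) "role") "user")) == "assistant") = true then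
                  PySem.Str.lower (PySem.Str.strip (hmOr (PySem.Dict.get? (PySem.Dict.mk item) "role") "user"))
                else "user"),
              ("content", PySem.Str.strip (hmOr (PySem.Dict.get? (PySem.Dict.mk item) "content") ""))]])
    = acc ++ (hmNorm item).toList := by
  intro acc item
  simp only [hmNorm]
  by_cases hc : PySem.Str.strip (hmOr (PySem.Dict.get? (PySem.Dict.mk item) "content") "") = "" <;>
    simp [hc]

-- A's whole loop, as a filterMap
theorem hm_fold (h : List (List (String × String))) (acc : List (List (String × String))) :
    h.foldl (fun acc item =>
      if PySem.Str.strip (hmOr (PySem.Dict.get? (PySem.Dict.mk item) "content") "") = "" then acc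
      else
        acc ++
          [[("role",
                if (PySem.Str.lower (PySem.Str.strip (hmOr (PySem.Dict.get? (PySem.Dict.mk item) "role") "user")) == "user" ||
                    PySem.Str.lower (PySem.Str.strip (hmOr (PySem.Dict.get? (PySem.Dict.mk item) "role") "user")) == "assistant") = true then
                  PySem.Str.lower (PySem.Str.strip (hmOr (PySem.Dict.get? (PySem.Dict.mk item) "role") "user"))
                else "user"),
              ("content", PySem.Str.strip (hmOr (PySem.Dict.get? (PySem.Dict.mk item) "content") ""))]]) acc
    = acc ++ h.filterMap hmNorm := by
  exact foldl_append_filterMap _ hmNorm hmA_step h acc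

theorem hmLoop_eq_take (limit : Int) (hlim : 0 ≤ limit) (l : List (List (String × String)))
    (out : List (List (String × String))) (hout : out.length ≤ limit.toNat) :
    hmLoop limit l out = out ++ (l.filterMap hmNorm).take (limit.toNat - out.length) := by
  induction l generalizing out with
  | nil => simp [hmLoop]
  | cons x t ih =>
    simp only [hmLoop]
    by_cases hstop : (out.length : Int) = limit
    · have h0 : limit.toNat - out.length = 0 := by omega
      simp [hstop, h0]
    · have hne : ((out.length : Int) == limit) = false := by simp [hstop]
      have hlt : out.length < limit.toNat := by omega
      rw [hne]
      simp only [Bool.false_eq_true, if_false]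
      cases hn : hmNorm x with
      | none => simp [hn, ih out hout]
      | some m =>
        simp only [List.filterMap_cons, hn]
        rw [ih (out ++ [m]) (by simp; omega)]
        have hsucc : limit.toNat - out.length = (limit.toNat - (out ++ [m]).length) + 1 := by
          simp; omega
        simp [hsucc]

-- a PySem.Dict lookup over a literal association list is a find?
theorem dict_getD_eq_find {a : Type} (l : List (String × a)) (k : String) (d : a) :
    PySem.Dict.getD (PySem.Dict.mk l) k d = ((l.find? (fun p => p.1 == k)).map (·.2)).getD d := by
  induction l with
  | nil => rfl
  | cons p t ih =>
    obtain ⟨k1, v1⟩ := p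
    rw [List.find?_cons]
    by_cases hk : k1 = k
    · simp [PySem.Dict.getD, PySem.Dict.get?_mk_cons, hk]
    · have hne : (k1 == k) = false := by simp [hk]
      simp only [show ((k1, v1).1 == k) = false from hne]
      rw [← ih]
      simp [PySem.Dict.getD, PySem.Dict.get?_mk_cons, hne]

-- str(o or "") stripped, as a plain Option.getD
theorem hmOr_strip_getD (o : Option String) :
    PySem.Str.strip (hmOr o "") = PySem.Str.strip (o.getD "") := by
  cases o with
  | none => rfl
  | some s =>
    simp only [hmOr, Option.getD]
    by_cases hs : s = "" <;> simp [hs]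

-- Python's s.strip() is empty exactly when s is all whitespace
theorem strip_eq_empty_iff (s : String) :
    PySem.Str.strip s = "" ↔ ∀ c ∈ s.toList, PySem.Chars.isspace c = true := by
  rw [← String.toList_eq_nil_iff, PySem.Str.toList_strip]
  simp only [PySem.Chars.strip, PySem.Chars.rstrip, PySem.Chars.lstrip]
  rw [List.reverse_eq_nil_iff, List.dropWhile_eq_nil_iff]
  constructor
  · intro hall c hc
    have hsplit : c ∈ List.takeWhile PySem.Chars.isspace s.toList ++ List.dropWhile PySem.Chars.isspace s.toList := by
      rw [List.takeWhile_append_dropWhile]; exact hc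
    rcases List.mem_append.mp hsplit with h | h
    · exact List.mem_takeWhile_imp h
    · exact hall c (List.mem_reverse.mpr h)
  · intro hall c hc
    exact hall c ((List.dropWhile_sublist _).subset (List.mem_reverse.mp hc))

-- hmNorm skips exactly the items with all-whitespace content
theorem hmNorm_eq_none_iff (item : List (String × String)) :
    hmNorm item = none ↔
      ∀ c ∈ (((item.find? (fun p => p.1 == "content")).map (·.2)).getD "").toList,
        PySem.Chars.isspace c = true := by
  have hco : PySem.Str.strip (hmOr (PySem.Dict.get? (PySem.Dict.mk item) "content") "")
      = PySem.Str.strip ((((item.find? (fun p => p.1 == "content")).map (·.2)).getD "")) := by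
    rw [hmOr_strip_getD]
    have := dict_getD_eq_find item "content" ""
    simp only [PySem.Dict.getD] at this
    rw [this]
  rw [← strip_eq_empty_iff, ← hco]
  simp only [hmNorm]
  by_cases hc : PySem.Str.strip (hmOr (PySem.Dict.get? (PySem.Dict.mk item) "content") "") = "" <;>
    simp [hc]

-- the normalized list is nonempty exactly on D_'s "some non-whitespace content" condition
theorem filterMap_ne_nil_iff_D (h : List (List (String × String))) :
    h.filterMap hmNorm ≠ [] ↔
      h.any (fun item => (((item.find? (fun p => p.1 == "content")).map (·.2)).getD "").toList.any
        (fun c => !PySem.Chars.isspace c)) = true := by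
  simp only [List.any_eq_true, Bool.not_eq_true']
  rw [Ne, List.filterMap_eq_nil_iff]
  push Not
  constructor
  · rintro ⟨item, hmem, hne⟩
    refine ⟨item, hmem, ?_⟩
    have := (not_iff_not.mpr (hmNorm_eq_none_iff item)).mp hne
    push Not at this
    rcases this with ⟨c, hc, hns⟩
    exact ⟨c, hc, by simpa using hns⟩
  · rintro ⟨item, hmem, c, hc, hns⟩
    refine ⟨item, hmem, ?_⟩
    rw [Ne, hmNorm_eq_none_iff]
    intro hall
    have := hall c hc
    simp [this] at hns

-- B's result is the last `limit` elements of the full normalized list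
theorem alt_eq_drop (cs : List (String × List (List (String × String)))) (limit : Int)
    (hlim : 0 ≤ limit) :
    history_messages_py_alt cs limit =
      (let F := (PySem.Dict.getD (PySem.Dict.mk cs) "history" []).filterMap hmNorm
       F.drop (F.length - limit.toNat)) := by
  simp only [history_messages_py_alt]
  rw [hmLoop_eq_take limit hlim _ [] (by simp)]
  simp [List.filterMap_reverse, List.take_reverse]

-- ===== VERDICT (by name: the statement is the Claim_ definition above) =====
theorem history_messages_py_spec : Claim_unchanged_history_messages_py := by
  unfold Claim_unchanged_history_messages_py
  intro cs limit _hDom hPre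
  unfold Spec_history_messages_py
  intro hND
  have hlim : 0 ≤ limit := hPre
  rw [alt_eq_drop cs limit hlim]
  simp only [history_messages_py]
  rw [hm_fold]
  simp only [List.nil_append]
  set H := PySem.Dict.getD (PySem.Dict.mk cs) "history" [] with hH
  set F := H.filterMap hmNorm with hF
  by_cases hbig : (F.length : Int) > limit
  · by_cases hz : limit = 0
    · -- limit = 0 with a nonempty normalized list contradicts ¬ D_
      exfalso
      apply hND
      refine ⟨hz, ?_⟩
      have hFne : F ≠ [] := by
        intro hnil
        rw [hnil] at hbig
        simp at hbig
        omega
      have hfind : ((cs.find? (fun p => p.1 == "history")).map (·.2)).getD [] = H := by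
        rw [hH, dict_getD_eq_find]
      rw [hfind]
      exact (filterMap_ne_nil_iff_D H).mp (hF ▸ hFne)
    · have hk : 0 < limit.toNat := by omega
      have hcast : -limit = -((limit.toNat : Nat) : Int) := by omega
      rw [if_pos hbig, hcast, PySem.List.slice_from_neg_natCast F limit.toNat hk]
  · rw [if_neg hbig]
    have h0 : F.length - limit.toNat = 0 := by omega
    simp [h0]

theorem history_messages_py_changed : Claim_changed_history_messages_py := by
  unfold Claim_changed_history_messages_py; decide

theorem history_messages_py_tight : Claim_exact_history_messages_py := by
  unfold Claim_exact_history_messages_py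
  intro cs limit _hDom _hPre hD
  obtain ⟨hz, hany⟩ := hD
  subst hz
  rw [alt_eq_drop cs 0 le_rfl]
  simp only [history_messages_py]
  rw [hm_fold]
  simp only [List.nil_append]
  set H := PySem.Dict.getD (PySem.Dict.mk cs) "history" [] with hH
  set F := H.filterMap hmNorm with hF
  have hfind : ((cs.find? (fun p => p.1 == "history")).map (·.2)).getD [] = H := by
    rw [hH, dict_getD_eq_find]
  rw [hfind] at hany
  have hFne : F ≠ [] := (filterMap_ne_nil_iff_D H).mpr hany
  have hpos : (F.length : Int) > 0 := by
    have := List.length_pos_iff.mpr hFne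
    omega
  rw [if_pos hpos]
  have hslice : PySem.List.slice F (some (-0)) none = F := by norm_num
  rw [hslice]
  simp [hFne]
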